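-- pv_equiv track=rewrite | github.com/Julesc013/dominium | tests/data_1/data1_fab_validate_tests.py | resolve_dependency_closure
-- ===== SOURCE A (Python) =====
-- def extract_capabilities(entries):
--     out = []
--     for entry in entries or []:
--         if isinstance(entry, dict):
--             cap_id = entry.get("capability_id")
--         else:
--             cap_id = entry
--         if isinstance(cap_id, str):
--             out.append(cap_id)
--     return out
--
-- def extract_depends(record):
--     return sorted(set(extract_capabilities(record.get("depends") or record.get("dependencies"))))
--
-- def resolve_dependency_closure(pack_id, manifests, providers):
--     include = set()
--     queue = [pack_id]
--     while queue:
--         current = queue.pop(0)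
--         if current in include:
--             continue
--         include.add(current)
--         record = manifests.get(current, {})
--         for cap_id in extract_depends(record):
--             for provider in providers.get(cap_id, []):
--                 if provider not in include:
--                     queue.append(provider)
--     return sorted(include)
-- ===== SOURCE B (Python) =====
-- def extract_capabilities(entries):
--     out = []
--     for entry in entries or []:
--         if isinstance(entry, dict):
--             cap_id = entry.get("capability_id")
--         else:
--             cap_id = entry
--         if isinstance(cap_id, str):
--             out.append(cap_id)
--     return out
--
--
-- def extract_depends(record):
--     return sorted(set(extract_capabilities(record.get("depends") or record.get("dependencies"))))
--
--
-- def resolve_dependency_closure(pack_id, manifests, providers):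
--     # Round-based fixpoint saturation instead of a BFS worklist: repeatedly
--     # expand the whole set by every member's providers until nothing changes.
--     include = {pack_id}
--     while True:
--         nxt = set(include)
--         for current in include:
--             for cap_id in extract_depends(manifests.get(current, {})):
--                 nxt.update(providers.get(cap_id, []))
--         if nxt == include:
--             return sorted(include)
--         include = nxt
-- ===== Notes on version B (the rewrite author's own statement) =====
-- stated objective: alternative
-- what changed: A's BFS worklist (a queue popped from the front with per-node visited checks) is replaced by round-based fixpoint saturation: the whole include set is re-expanded by every member's providers until a full pass adds nothing, with no queue at all.
import Mathlib
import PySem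

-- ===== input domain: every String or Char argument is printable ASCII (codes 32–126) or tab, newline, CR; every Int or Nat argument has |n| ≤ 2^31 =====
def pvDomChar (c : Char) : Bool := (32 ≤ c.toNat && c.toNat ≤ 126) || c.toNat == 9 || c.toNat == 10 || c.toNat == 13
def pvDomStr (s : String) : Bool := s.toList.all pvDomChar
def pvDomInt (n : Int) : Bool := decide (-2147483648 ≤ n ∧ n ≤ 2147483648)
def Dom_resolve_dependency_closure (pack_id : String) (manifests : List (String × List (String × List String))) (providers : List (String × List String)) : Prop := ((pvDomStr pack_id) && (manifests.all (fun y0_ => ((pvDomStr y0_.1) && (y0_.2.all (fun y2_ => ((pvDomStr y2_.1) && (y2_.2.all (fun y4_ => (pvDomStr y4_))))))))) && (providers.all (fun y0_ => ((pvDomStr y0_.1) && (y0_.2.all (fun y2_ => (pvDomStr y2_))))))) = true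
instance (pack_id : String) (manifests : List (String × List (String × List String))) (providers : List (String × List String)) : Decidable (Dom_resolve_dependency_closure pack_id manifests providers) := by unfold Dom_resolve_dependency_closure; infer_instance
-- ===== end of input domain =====

-- B replaces A's BFS worklist (a queue popped from the front) by round-based fixpoint
-- saturation: repeatedly expand the whole set by every member's providers until a pass
-- changes nothing; objective: alternative decomposition, not speed.

-- ===== PORT A =====
-- dict lookup d.get(k, dflt) on an association list (first match)
def pvGet? {α : Type} (d : List (String × α)) (k : String) : Option α :=
  (d.find? (fun kv => kv.1 == k)).map (fun kv => kv.2)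

-- shared helper: the Python module's extract_capabilities (each entry is a str here,
-- so isinstance(entry, dict) is False and isinstance(cap_id, str) is True)
def extract_capabilities (entries : List String) : List String :=
  entries.foldl (fun out entry => out ++ [entry]) []

-- shared helper: extract_depends; 'record.get("depends") or record.get("dependencies")'
-- falls through to "dependencies" when "depends" is missing or its list is empty (falsy),
-- and 'entries or []' turns a missing value into []
def extract_depends (record : List (String × List String)) : List String :=
  let entries :=
    match pvGet? record "depends" with
    | some l => if List.isEmpty l then (pvGet? record "dependencies").getD [] else l
    | none => (pvGet? record "dependencies").getD []
  PySem.List.sorted (PySem.Set.ofList (extract_capabilities entries)) (fun x => x) false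

-- the providers reached from one node: the two nested for-loops of A (and of B) visit
-- exactly this concatenation, in this order
def pvSuccs (manifests : List (String × List (String × List String))) (providers : List (String × List String)) (current : String) : List String :=
  (extract_depends ((pvGet? manifests current).getD [])).flatMap
    (fun cap_id => (pvGet? providers cap_id).getD [])

-- a finite universe containing every string either algorithm can ever add (used only for
-- termination/fuel; it does not influence any computed value)
def pvUniv (pack_id : String) (providers : List (String × List String)) : List String :=
  pack_id :: providers.flatMap (fun kv => kv.2)

lemma pv_mem_contains {s : PySem.Set String} {x : String} :
    PySem.Set.contains s x = true ↔ x ∈ s := by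
  simp [PySem.Set.contains]

lemma pvGet?_sub_flat (providers : List (String × List String)) (k : String) :
    ∀ y ∈ (pvGet? providers k).getD [], y ∈ providers.flatMap (fun kv => kv.2) := by
  induction providers with
  | nil => simp [pvGet?]
  | cons hd tl ih =>
    intro y hy
    simp only [pvGet?, List.find?] at hy ih
    by_cases h : (hd.1 == k) = true
    · simp only [h, Option.map_some, Option.getD_some] at hy
      exact List.mem_flatMap.mpr ⟨hd, List.mem_cons_self, hy⟩
    · simp only [h] at hy
      rcases List.mem_flatMap.mp (ih y hy) with ⟨kv, hkv, hykv⟩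
      exact List.mem_flatMap.mpr ⟨kv, List.mem_cons_of_mem _ hkv, hykv⟩

lemma pvSuccs_sub_univ (pack_id : String) (manifests : List (String × List (String × List String))) (providers : List (String × List String)) (c : String) :
    ∀ y ∈ pvSuccs manifests providers c, y ∈ pvUniv pack_id providers := by
  intro y hy
  rcases List.mem_flatMap.mp hy with ⟨cap, _, hy⟩
  exact List.mem_cons_of_mem _ (pvGet?_sub_flat providers cap y hy)

lemma pv_length_filter_lt {α : Type} {p q : α → Bool} {l : List α} {a : α}
    (h : ∀ x, q x = true → p x = true) (ha : a ∈ l) (hpa : p a = true) (hqa : q a = false) :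
    (l.filter q).length < (l.filter p).length := by
  obtain ⟨s, t, rfl⟩ := List.append_of_mem ha
  have h1 : List.countP q s ≤ List.countP p s := List.countP_mono_left (fun x _ hx => h x hx)
  have h2 : List.countP q t ≤ List.countP p t := List.countP_mono_left (fun x _ hx => h x hx)
  have e1 : (List.filter q (s ++ a :: t)).length = List.countP q s + List.countP q t := by
    simp [← List.countP_eq_length_filter, hqa]
  have e2 : (List.filter p (s ++ a :: t)).length = List.countP p s + (List.countP p t + 1) := by
    simp [← List.countP_eq_length_filter, hpa]
  omega

lemma pv_contains_add_mono {s : PySem.Set String} {c x : String}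
    (h : PySem.Set.contains (PySem.Set.add s c) x = false) :
    PySem.Set.contains s x = false := by
  by_contra hx
  rw [Bool.not_eq_false, pv_mem_contains] at hx
  rw [Bool.eq_false_iff] at h
  exact h (pv_mem_contains.mpr ((PySem.Set.mem_add s c x).mpr (Or.inl hx)))

-- the BFS while-loop of A.  'incl' is the Python set, 'queue' the Python list; the
-- hypothesis arguments only justify termination and carry no data.
def bfsA (manifests : List (String × List (String × List String))) (providers : List (String × List String)) (U : List String)
    (hU : ∀ c, ∀ y ∈ pvSuccs manifests providers c, y ∈ U)
    (incl : PySem.Set String) (queue : List String) (hq : ∀ x ∈ queue, x ∈ U) : PySem.Set String :=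
  match queue with
  | [] => incl
  | current :: rest =>
    if hmem : PySem.Set.contains incl current = true then
      bfsA manifests providers U hU incl rest
        (fun x hx => hq x (List.mem_cons_of_mem _ hx))
    else
      bfsA manifests providers U hU (PySem.Set.add incl current)
        (rest ++ (pvSuccs manifests providers current).filter
          (fun provider => !(PySem.Set.contains (PySem.Set.add incl current) provider)))
        (fun x hx => by
          rcases List.mem_append.mp hx with h | h
          · exact hq x (List.mem_cons_of_mem _ h)
          · exact hU current x (List.mem_of_mem_filter h))
  termination_by ((U.filter (fun x => !(PySem.Set.contains incl x))).length, queue.length)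
  decreasing_by
  · exact Prod.Lex.right _ (by simp)
  · apply Prod.Lex.left
    apply pv_length_filter_lt (a := current)
    · intro x hx
      simp only [Bool.not_eq_eq_eq_not, Bool.not_true] at hx ⊢
      exact pv_contains_add_mono hx
    · exact hq current List.mem_cons_self
    · simp only [Bool.not_eq_eq_eq_not, Bool.not_true]
      exact Bool.eq_false_iff.mpr hmem
    · simp [pv_mem_contains.mpr ((PySem.Set.mem_add incl current current).mpr (Or.inr rfl))]

def resolve_dependency_closure (pack_id : String) (manifests : List (String × List (String × List String))) (providers : List (String × List String)) : List String :=
  PySem.List.sorted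
    (bfsA manifests providers (pvUniv pack_id providers)
      (pvSuccs_sub_univ pack_id manifests providers)
      PySem.Set.empty [pack_id]
      (fun x hx => by simp at hx; subst hx; exact List.mem_cons_self))
    (fun x => x) false

-- ===== PORT B =====
-- one saturation round: nxt = set(incl); for current in incl: (the two nested
-- for-loops) nxt.update(providers.get(cap_id, []))
def stepB (manifests : List (String × List (String × List String))) (providers : List (String × List String)) (incl : PySem.Set String) : PySem.Set String :=
  incl.foldl (fun nxt current => PySem.Set.update nxt (pvSuccs manifests providers current))
    (PySem.Set.ofList incl)

-- the 'while True' loop; it returns the final set (the caller sorts it, as the Python's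
-- 'return sorted(incl)' does).  The fuel only makes the recursion structural: the
-- proofs below show the fixpoint test fires before it runs out.
def loopB (manifests : List (String × List (String × List String))) (providers : List (String × List String)) : Nat → PySem.Set String → PySem.Set String
  | 0, incl => incl
  | Nat.succ fuel, incl =>
    let nxt := stepB manifests providers incl
    if PySem.Set.equal nxt incl then incl
    else loopB manifests providers fuel nxt

def resolve_dependency_closure_alt (pack_id : String) (manifests : List (String × List (String × List String))) (providers : List (String × List String)) : List String :=
  PySem.List.sorted
    (loopB manifests providers ((pvUniv pack_id providers).length + 1)
      (PySem.Set.ofList [pack_id]))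
    (fun x => x) false

-- ===== PRECONDITION & SPEC =====
def Spec_resolve_dependency_closure (pack_id : String) (manifests : List (String × List (String × List String))) (providers : List (String × List String)) (out : List String) : Prop := out = resolve_dependency_closure_alt pack_id manifests providers
instance (pack_id : String) (manifests : List (String × List (String × List String))) (providers : List (String × List String)) (out : List String) : Decidable (Spec_resolve_dependency_closure pack_id manifests providers out) := by unfold Spec_resolve_dependency_closure; infer_instance

-- ===== CLAIM (what is proved, stated in full; the proofs are below) =====
def Claim_equal_resolve_dependency_closure : Prop := ∀ (pack_id : String) (manifests : List (String × List (String × List String))) (providers : List (String × List String)), Dom_resolve_dependency_closure pack_id manifests providers → Spec_resolve_dependency_closure pack_id manifests providers (resolve_dependency_closure pack_id manifests providers)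

-- ===== LEMMAS AND PROOFS =====

-- a set closed under "x pulls in each provider of each of its dependencies"
def pvClosed (manifests : List (String × List (String × List String))) (providers : List (String × List String)) (S : List String) : Prop :=
  ∀ x ∈ S, ∀ y ∈ pvSuccs manifests providers x, y ∈ S

-- ---- A side: the BFS result contains incl∪queue, is closed, minimal, and duplicate-free
lemma bfsA_mem (manifests : List (String × List (String × List String))) (providers : List (String × List String)) (U : List String)
    (hU : ∀ c, ∀ y ∈ pvSuccs manifests providers c, y ∈ U)
    (incl : PySem.Set String) (queue : List String) (hq : ∀ x ∈ queue, x ∈ U) :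
    ∀ x, (x ∈ incl ∨ x ∈ queue) → x ∈ bfsA manifests providers U hU incl queue hq := by
  induction incl, queue, hq using bfsA.induct manifests providers U hU with
  | case1 incl hq _ =>
    intro x hx
    rw [bfsA]
    rcases hx with h | h
    · exact h
    · cases h
  | case2 incl current rest hq hmem _ ih =>
    intro x hx
    rw [bfsA, dif_pos hmem]
    apply ih
    rcases hx with h | h
    · exact Or.inl h
    · rcases List.mem_cons.mp h with rfl | h
      · exact Or.inl (pv_mem_contains.mp hmem)
      · exact Or.inr h
  | case3 incl current rest hq hmem _ ih =>
    intro x hx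
    rw [bfsA, dif_neg hmem]
    apply ih
    rcases hx with h | h
    · exact Or.inl ((PySem.Set.mem_add _ _ _).mpr (Or.inl h))
    · rcases List.mem_cons.mp h with rfl | h
      · exact Or.inl ((PySem.Set.mem_add _ _ _).mpr (Or.inr rfl))
      · exact Or.inr (List.mem_append_left _ h)

lemma bfsA_closed (manifests : List (String × List (String × List String))) (providers : List (String × List String)) (U : List String)
    (hU : ∀ c, ∀ y ∈ pvSuccs manifests providers c, y ∈ U)
    (incl : PySem.Set String) (queue : List String) (hq : ∀ x ∈ queue, x ∈ U)
    (H : ∀ x ∈ incl, ∀ y ∈ pvSuccs manifests providers x, y ∈ incl ∨ y ∈ queue) :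
    pvClosed manifests providers (bfsA manifests providers U hU incl queue hq) := by
  revert H
  induction incl, queue, hq using bfsA.induct manifests providers U hU with
  | case1 incl hq _ =>
    intro H
    rw [bfsA]
    intro x hx y hy
    rcases H x hx y hy with h | h
    · exact h
    · cases h
  | case2 incl current rest hq hmem _ ih =>
    intro H
    rw [bfsA, dif_pos hmem]
    apply ih
    intro x hx y hy
    rcases H x hx y hy with h | h
    · exact Or.inl h
    · rcases List.mem_cons.mp h with rfl | h
      · exact Or.inl (pv_mem_contains.mp hmem)
      · exact Or.inr h
  | case3 incl current rest hq hmem _ ih =>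
    intro H
    rw [bfsA, dif_neg hmem]
    apply ih
    intro x hx y hy
    rcases (PySem.Set.mem_add _ _ _).mp hx with hx' | rfl
    · rcases H x hx' y hy with h | h
      · exact Or.inl ((PySem.Set.mem_add _ _ _).mpr (Or.inl h))
      · rcases List.mem_cons.mp h with rfl | h
        · exact Or.inl ((PySem.Set.mem_add _ _ _).mpr (Or.inr rfl))
        · exact Or.inr (List.mem_append_left _ h)
    · by_cases hy' : y ∈ PySem.Set.add incl x
      · exact Or.inl hy'
      · refine Or.inr (List.mem_append_right _ ?_)
        refine List.mem_filter.mpr ⟨hy, ?_⟩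
        simp only [Bool.not_eq_eq_eq_not, Bool.not_true]
        exact Bool.eq_false_iff.mpr (fun hc => hy' (pv_mem_contains.mp hc))

lemma bfsA_min (manifests : List (String × List (String × List String))) (providers : List (String × List String)) (U : List String)
    (hU : ∀ c, ∀ y ∈ pvSuccs manifests providers c, y ∈ U)
    (incl : PySem.Set String) (queue : List String) (hq : ∀ x ∈ queue, x ∈ U)
    (T : List String) (hT : pvClosed manifests providers T)
    (hi : ∀ x ∈ incl, x ∈ T) (hqT : ∀ x ∈ queue, x ∈ T) :
    ∀ x ∈ bfsA manifests providers U hU incl queue hq, x ∈ T := by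
  revert hi hqT
  induction incl, queue, hq using bfsA.induct manifests providers U hU with
  | case1 incl hq _ =>
    intro hi _
    rw [bfsA]
    exact hi
  | case2 incl current rest hq hmem _ ih =>
    intro hi hqT
    rw [bfsA, dif_pos hmem]
    exact ih hi (fun x hx => hqT x (List.mem_cons_of_mem _ hx))
  | case3 incl current rest hq hmem _ ih =>
    intro hi hqT
    rw [bfsA, dif_neg hmem]
    have hcT : current ∈ T := hqT current List.mem_cons_self
    apply ih
    · intro x hx
      rcases (PySem.Set.mem_add _ _ _).mp hx with h | rfl
      · exact hi x h
      · exact hcT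
    · intro x hx
      rcases List.mem_append.mp hx with h | h
      · exact hqT x (List.mem_cons_of_mem _ h)
      · exact hT current hcT x (List.mem_of_mem_filter h)

lemma bfsA_nodup (manifests : List (String × List (String × List String))) (providers : List (String × List String)) (U : List String)
    (hU : ∀ c, ∀ y ∈ pvSuccs manifests providers c, y ∈ U)
    (incl : PySem.Set String) (queue : List String) (hq : ∀ x ∈ queue, x ∈ U)
    (hnd : incl.Nodup) : (bfsA manifests providers U hU incl queue hq).Nodup := by
  revert hnd
  induction incl, queue, hq using bfsA.induct manifests providers U hU with
  | case1 incl hq _ =>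
    intro hnd
    rw [bfsA]
    exact hnd
  | case2 incl current rest hq hmem _ ih =>
    intro hnd
    rw [bfsA, dif_pos hmem]
    exact ih hnd
  | case3 incl current rest hq hmem _ ih =>
    intro hnd
    rw [bfsA, dif_neg hmem]
    exact ih (PySem.Set.nodup_add _ _ hnd)

-- ---- B side
lemma mem_stepB (manifests : List (String × List (String × List String))) (providers : List (String × List String)) (S : PySem.Set String) (y : String) :
    y ∈ stepB manifests providers S ↔ y ∈ S ∨ ∃ x ∈ S, y ∈ pvSuccs manifests providers x := by
  have gen : ∀ (l : List String) (acc : PySem.Set String),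
      y ∈ l.foldl (fun nxt c => PySem.Set.update nxt (pvSuccs manifests providers c)) acc ↔
        y ∈ acc ∨ ∃ x ∈ l, y ∈ pvSuccs manifests providers x := by
    intro l
    induction l with
    | nil => simp
    | cons b t ih =>
      intro acc
      simp only [List.foldl_cons, ih, PySem.Set.mem_update, List.mem_cons]
      constructor
      · rintro ((h | h) | ⟨x, hx, hy⟩)
        · exact Or.inl h
        · exact Or.inr ⟨b, Or.inl rfl, h⟩
        · exact Or.inr ⟨x, Or.inr hx, hy⟩
      · rintro (h | ⟨x, (rfl | hx), hy⟩)
        · exact Or.inl (Or.inl h)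
        · exact Or.inl (Or.inr hy)
        · exact Or.inr ⟨x, hx, hy⟩
  rw [stepB, gen, PySem.Set.mem_ofList]

lemma nodup_stepB (manifests : List (String × List (String × List String))) (providers : List (String × List String)) (S : PySem.Set String) :
    (stepB manifests providers S).Nodup := by
  have gen : ∀ (l : List String) (acc : PySem.Set String), acc.Nodup →
      (l.foldl (fun nxt c => PySem.Set.update nxt (pvSuccs manifests providers c)) acc).Nodup := by
    intro l
    induction l with
    | nil => exact fun acc h => h
    | cons b t ih =>
      intro acc hacc
      exact ih _ (PySem.Set.nodup_update _ _ hacc)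
  exact gen S _ (PySem.Set.nodup_ofList _)

lemma loopB_mono (manifests : List (String × List (String × List String))) (providers : List (String × List String)) (fuel : Nat) (S : PySem.Set String) :
    ∀ x ∈ S, x ∈ loopB manifests providers fuel S := by
  induction fuel generalizing S with
  | zero => exact fun x hx => hx
  | succ fuel ih =>
    intro x hx
    rw [loopB]
    split
    · exact hx
    · exact ih _ x ((mem_stepB manifests providers S x).mpr (Or.inl hx))

lemma loopB_min (manifests : List (String × List (String × List String))) (providers : List (String × List String)) (fuel : Nat) (S : PySem.Set String)
    (T : List String) (hT : pvClosed manifests providers T) (hS : ∀ x ∈ S, x ∈ T) :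
    ∀ x ∈ loopB manifests providers fuel S, x ∈ T := by
  induction fuel generalizing S with
  | zero => exact hS
  | succ fuel ih =>
    rw [loopB]
    split
    · exact hS
    · apply ih
      intro y hy
      rcases (mem_stepB manifests providers S y).mp hy with h | ⟨x, hx, hyx⟩
      · exact hS y h
      · exact hT x (hS x hx) y hyx

lemma loopB_closed (manifests : List (String × List (String × List String))) (providers : List (String × List String)) (U : List String)
    (hU : ∀ c, ∀ y ∈ pvSuccs manifests providers c, y ∈ U) :
    ∀ (fuel : Nat) (S : PySem.Set String), S.Nodup → (∀ x ∈ S, x ∈ U) →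
      U.dedup.length < fuel + S.length →
      pvClosed manifests providers (loopB manifests providers fuel S) := by
  intro fuel
  induction fuel with
  | zero =>
    intro S hnd hSU hlen
    exfalso
    have hsub : S ⊆ U.dedup := fun x hx => List.mem_dedup.mpr (hSU x hx)
    have := (List.subperm_of_subset hnd hsub).length_le
    omega
  | succ fuel ih =>
    intro S hnd hSU hlen
    rw [loopB]
    split
    · rename_i heq
      intro x hx y hy
      have : y ∈ stepB manifests providers S :=
        (mem_stepB manifests providers S y).mpr (Or.inr ⟨x, hx, hy⟩)
      exact ((PySem.Set.equal_iff _ _).mp heq y).mp this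
    · rename_i heq
      have hSsub : ∀ x ∈ S, x ∈ stepB manifests providers S :=
        fun x hx => (mem_stepB manifests providers S x).mpr (Or.inl hx)
      have hstepU : ∀ x ∈ stepB manifests providers S, x ∈ U := by
        intro x hx
        rcases (mem_stepB manifests providers S x).mp hx with h | ⟨c, _, hxc⟩
        · exact hSU x h
        · exact hU c x hxc
      have hbig : S.length + 1 ≤ (stepB manifests providers S).length := by
        rw [Bool.not_eq_true] at heq
        have hex : ∃ y, y ∈ stepB manifests providers S ∧ y ∉ S := by
          by_contra hno
          rw [not_exists] at hno
          apply absurd heq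
          rw [Bool.not_eq_false, PySem.Set.equal_iff]
          refine fun y => ⟨fun h => ?_, fun h => hSsub y h⟩
          by_contra hn
          exact hno y ⟨h, hn⟩
        obtain ⟨y, hyS', hyS⟩ := hex
        have : (y :: S).Subperm (stepB manifests providers S) :=
          List.subperm_of_subset (List.nodup_cons.mpr ⟨hyS, hnd⟩)
            (fun z hz => by
              rcases List.mem_cons.mp hz with rfl | hz
              · exact hyS'
              · exact hSsub z hz)
        simpa using this.length_le
      exact ih _ (nodup_stepB manifests providers S) hstepU (by omega)

lemma loopB_nodup (manifests : List (String × List (String × List String))) (providers : List (String × List String)) (fuel : Nat) (S : PySem.Set String)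
    (hnd : S.Nodup) : (loopB manifests providers fuel S).Nodup := by
  induction fuel generalizing S with
  | zero => exact hnd
  | succ fuel ih =>
    rw [loopB]
    split
    · exact hnd
    · exact ih _ (nodup_stepB manifests providers S)

-- ===== VERDICT (by name: the statement is the Claim_ definition above) =====
theorem resolve_dependency_closure_spec : Claim_equal_resolve_dependency_closure := by
  intro pack_id manifests providers _
  unfold Spec_resolve_dependency_closure resolve_dependency_closure resolve_dependency_closure_alt
  set U := pvUniv pack_id providers with hUdef
  have hU := pvSuccs_sub_univ pack_id manifests providers
  set I := bfsA manifests providers U (pvSuccs_sub_univ pack_id manifests providers)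
      PySem.Set.empty [pack_id]
      (fun x hx => by simp at hx; subst hx; exact List.mem_cons_self) with hI
  set R := loopB manifests providers (U.length + 1) (PySem.Set.ofList [pack_id]) with hR
  have hpackU : pack_id ∈ U := List.mem_cons_self
  -- closedness and base membership
  have hIclosed : pvClosed manifests providers I :=
    bfsA_closed _ _ _ _ _ _ _ (by intro x hx; cases hx)
  have hIpack : pack_id ∈ I := bfsA_mem _ _ _ _ _ _ _ _ (Or.inr List.mem_cons_self)
  have hRclosed : pvClosed manifests providers R := by
    apply loopB_closed manifests providers U hU _ _ (PySem.Set.nodup_ofList _)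
    · intro x hx
      rw [PySem.Set.mem_ofList] at hx
      simp at hx; subst hx; exact hpackU
    · have hd : U.dedup.length ≤ U.length := List.Sublist.length_le (List.dedup_sublist U)
      have : (PySem.Set.ofList [pack_id]).length = 1 := rfl
      omega
  have hRpack : pack_id ∈ R :=
    loopB_mono _ _ _ _ pack_id (PySem.Set.mem_ofList _ _ |>.mpr List.mem_cons_self)
  -- mutual inclusion
  have hIR : ∀ x ∈ I, x ∈ R := by
    apply bfsA_min _ _ _ _ _ _ _ _ hRclosed
    · intro x hx; cases hx
    · intro x hx
      simp at hx; subst hx; exact hRpack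
  have hRI : ∀ x ∈ R, x ∈ I := by
    apply loopB_min _ _ _ _ _ hIclosed
    intro x hx
    rw [PySem.Set.mem_ofList] at hx
    simp at hx; subst hx; exact hIpack
  -- nodup + mutual subset ⇒ permutation ⇒ equal sorted lists
  have hInd : I.Nodup := bfsA_nodup _ _ _ _ _ _ _ List.nodup_nil
  have hRnd : R.Nodup := loopB_nodup _ _ _ _ (PySem.Set.nodup_ofList _)
  have hperm : I.Perm R :=
    (List.subperm_of_subset hInd hIR).antisymm (List.subperm_of_subset hRnd hRI)
  exact (PySem.List.sorted_id_eq_sorted_id_iff_perm I R).mpr hperm
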